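-- pv_equiv track=rewrite | github.com/Nicolas13210/AOC2024 | 2024/day2/solve.py | is_dampener_safe
-- ===== SOURCE A (Python) =====
-- def is_dampener_safe(row):
--     first_try = is_safe(row)
--     if first_try:
--         return True
--     for k in range(len(row)):
--         copy_row = row.copy()
--         copy_row.pop(k)
--         if is_safe(copy_row):
--             return True
--     return False
--
-- def is_safe(row):
--     if sorted(row) != row and sorted(row, reverse=True) != row:
--         return False
--     for k in range(len(row)-1):
--         if abs(row[k] - row[k+1]) < 1 or abs(row[k] - row[k+1]) > 3:
--             return False
--     return True
-- ===== SOURCE B (Python) =====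
-- def is_dampener_safe(row):
--     return _damp_asc(row) or _damp_asc([-x for x in row])
--
-- def _asc(row):
--     return all(1 <= b - a <= 3 for a, b in zip(row, row[1:]))
--
-- def _first_bad(row):
--     for i in range(len(row) - 1):
--         if not (1 <= row[i + 1] - row[i] <= 3):
--             return i
--     return None
--
-- def _damp_asc(row):
--     i = _first_bad(row)
--     if i is None:
--         return True
--     return _asc(row[:i] + row[i + 1:]) or _asc(row[:i + 1] + row[i + 2:])
-- ===== Notes on version B (the rewrite author's own statement) =====
-- stated objective: faster
-- what changed: Replaces the sort-based safety test and the brute-force try-every-removal loop by a linear adjacent-difference scan: the row (and its negation, for the descending case) is scanned once for the first bad adjacent pair, and only removal of that pair's two endpoints is tried.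
import Mathlib
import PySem

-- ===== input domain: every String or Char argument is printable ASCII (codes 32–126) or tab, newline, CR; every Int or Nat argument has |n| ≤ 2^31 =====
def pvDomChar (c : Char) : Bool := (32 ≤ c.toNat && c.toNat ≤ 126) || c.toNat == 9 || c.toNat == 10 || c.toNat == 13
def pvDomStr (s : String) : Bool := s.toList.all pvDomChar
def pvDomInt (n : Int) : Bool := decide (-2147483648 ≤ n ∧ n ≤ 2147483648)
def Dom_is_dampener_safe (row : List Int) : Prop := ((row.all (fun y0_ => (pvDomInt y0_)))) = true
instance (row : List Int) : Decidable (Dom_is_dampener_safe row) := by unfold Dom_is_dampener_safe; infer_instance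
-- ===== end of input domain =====

-- B replaces A's sort-based safety test and try-every-removal loop by a single linear scan
-- (first bad adjacent pair; only its two endpoints are candidates for removal): objective = faster.

-- ===== PORT A =====
-- helper: Python is_safe(row)
def pv_is_safe (row : List Int) : Bool :=
  if PySem.List.sorted row (fun x => x) ≠ row ∧ PySem.List.sorted row (fun x => x) true ≠ row then
    false
  else
    -- 'for k in range(len(row)-1): if abs(...) < 1 or abs(...) > 3: return False / return True'
    (PySem.List.pyRange 0 ((row.length : Int) - 1)).all (fun k =>
      ! (decide (|PySem.List.pyGetD row k 0 - PySem.List.pyGetD row (k + 1) 0| < 1) ||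
         decide (3 < |PySem.List.pyGetD row k 0 - PySem.List.pyGetD row (k + 1) 0|)))

def is_dampener_safe (row : List Int) : Bool :=
  let first_try := pv_is_safe row
  if first_try then true
  else
    -- 'for k in range(len(row)): copy_row = row.copy(); copy_row.pop(k); if is_safe(copy_row): return True / return False'
    (PySem.List.pyRange 0 (row.length : Int)).any (fun k =>
      match PySem.List.pop? row k with
      | some (_, copy_row) => pv_is_safe copy_row
      | none => false)

-- ===== PORT B =====
-- helper: _asc(row) = all(1 <= b - a <= 3 for a, b in zip(row, row[1:]))
def pvAsc (row : List Int) : Bool :=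
  (row.zip (row.drop 1)).all (fun p => decide (1 ≤ p.2 - p.1) && decide (p.2 - p.1 ≤ 3))

-- helper: _first_bad(row) = index of the first adjacent pair violating 1 <= diff <= 3, scanning left to right
def pvFirstBad : List Int → Option Nat
  | a :: b :: t => if 1 ≤ b - a ∧ b - a ≤ 3 then (pvFirstBad (b :: t)).map (· + 1) else some 0
  | _ => none

-- helper: _damp_asc(row); slices row[:i]+row[i+1:] ported as take/drop (exact for these nonnegative slices)
def pvDampAsc (row : List Int) : Bool :=
  match pvFirstBad row with
  | none => true
  | some i => pvAsc (row.take i ++ row.drop (i + 1)) || pvAsc (row.take (i + 1) ++ row.drop (i + 2))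

def is_dampener_safe_alt (row : List Int) : Bool :=
  pvDampAsc row || pvDampAsc (row.map (fun x => -x))

-- ===== PRECONDITION & SPEC =====
def Spec_is_dampener_safe (row : List Int) (out : Bool) : Prop := out = is_dampener_safe_alt row
instance (row : List Int) (out : Bool) : Decidable (Spec_is_dampener_safe row out) := by unfold Spec_is_dampener_safe; infer_instance

-- ===== CLAIM (what is proved, stated in full; the proofs are below) =====
def Claim_equal_is_dampener_safe : Prop := ∀ (row : List Int), Dom_is_dampener_safe row → Spec_is_dampener_safe row (is_dampener_safe row)

-- ===== LEMMAS AND PROOFS =====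

-- 'pvGood a b' = the ascending-step condition of B; 'pvQ a b' = the absolute-difference condition of A's loop
def pvGood (a b : Int) : Prop := 1 ≤ b - a ∧ b - a ≤ 3
def pvQ (a b : Int) : Prop := ¬ (|a - b| < 1 ∨ 3 < |a - b|)

theorem pvAsc_iff (row : List Int) : pvAsc row = true ↔ List.IsChain pvGood row := by
  match row with
  | [] => simp [pvAsc]
  | [a] => simp [pvAsc]
  | a :: b :: t =>
    have ih := pvAsc_iff (b :: t)
    simp only [pvAsc, List.drop_one, List.tail_cons, List.zip_cons_cons, List.all_cons,
      Bool.and_eq_true, decide_eq_true_eq, List.isChain_cons_cons] at *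
    rw [← ih]; unfold pvGood; tauto

theorem firstBad_none_iff (row : List Int) :
    pvFirstBad row = none ↔ List.IsChain pvGood row := by
  match row with
  | [] => simp [pvFirstBad]
  | [a] => simp [pvFirstBad]
  | a :: b :: t =>
    have ih := firstBad_none_iff (b :: t)
    rw [pvFirstBad, List.isChain_cons_cons, ← ih]
    split_ifs with h
    · simp [pvGood, h]
    · constructor
      · intro hc; simp at hc
      · intro hc; exact absurd hc.1 h

theorem firstBad_some_lt {row : List Int} {i : Nat} (h : pvFirstBad row = some i) :
    i + 1 < row.length := by
  match row, i with
  | [], i => simp [pvFirstBad] at h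
  | [a], i => simp [pvFirstBad] at h
  | a :: b :: t, i =>
    rw [pvFirstBad] at h
    split_ifs at h with hg
    · simp only [Option.map_eq_some_iff] at h
      obtain ⟨j, hj, rfl⟩ := h
      have := firstBad_some_lt hj
      simp only [List.length_cons] at *; omega
    · simp only [Option.some.injEq] at h
      subst h; simp only [List.length_cons]; omega

theorem firstBad_some_erase {row : List Int} {i : Nat} (h : pvFirstBad row = some i)
    {k : Nat} (hk : List.IsChain pvGood (row.eraseIdx k)) : k = i ∨ k = i + 1 := by
  match row, i, k with
  | [], _, _ => simp [pvFirstBad] at h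
  | [a], _, _ => simp [pvFirstBad] at h
  | a :: b :: t, i, k =>
    rw [pvFirstBad] at h
    split_ifs at h with hg
    · simp only [Option.map_eq_some_iff] at h
      obtain ⟨j, hj, rfl⟩ := h
      match k with
      | 0 =>
        rw [List.eraseIdx_cons_zero] at hk
        rw [(firstBad_none_iff (b :: t)).2 hk] at hj
        exact absurd hj (by simp)
      | k' + 1 =>
        rw [List.eraseIdx_cons_succ] at hk
        have htail : List.IsChain pvGood ((b :: t).eraseIdx k') := hk.tail
        rcases firstBad_some_erase hj htail with rfl | rfl
        · exact Or.inl rfl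
        · exact Or.inr rfl
    · simp only [Option.some.injEq] at h
      subst h
      match k with
      | 0 => exact Or.inl rfl
      | 1 => exact Or.inr rfl
      | k' + 2 =>
        rw [List.eraseIdx_cons_succ, List.eraseIdx_cons_succ] at hk
        exact absurd (List.isChain_cons_cons.1 hk).1 hg

theorem dampAsc_iff (row : List Int) :
    pvDampAsc row = true ↔
      List.IsChain pvGood row ∨ ∃ k < row.length, List.IsChain pvGood (row.eraseIdx k) := by
  rcases hfb : pvFirstBad row with _ | i
  · simp only [pvDampAsc, hfb]
    exact ⟨fun _ => Or.inl ((firstBad_none_iff row).1 hfb), fun _ => trivial⟩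
  · have hlt := firstBad_some_lt hfb
    simp only [pvDampAsc, hfb, Bool.or_eq_true, pvAsc_iff,
      ← List.eraseIdx_eq_take_drop_succ]
    constructor
    · rintro (h | h)
      · exact Or.inr ⟨i, by omega, h⟩
      · exact Or.inr ⟨i + 1, by omega, h⟩
    · rintro (h | ⟨k, hk, h⟩)
      · rw [(firstBad_none_iff row).2 h] at hfb; cases hfb
      · rcases firstBad_some_erase hfb h with rfl | rfl
        · exact Or.inl h
        · exact Or.inr h

theorem pyGetD_coe (row : List Int) {i : Nat} (h : i < row.length) :
    PySem.List.pyGetD row (i : Int) 0 = row[i] := by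
  rw [PySem.List.pyGetD_natCast, List.getD_eq_getElem _ _ h]

theorem loop_iff (row : List Int) :
    ((PySem.List.pyRange 0 ((row.length : Int) - 1)).all (fun k =>
      ! (decide (|PySem.List.pyGetD row k 0 - PySem.List.pyGetD row (k + 1) 0| < 1) ||
         decide (3 < |PySem.List.pyGetD row k 0 - PySem.List.pyGetD row (k + 1) 0|))) = true)
    ↔ List.IsChain pvQ row := by
  rw [List.all_eq_true, List.isChain_iff_getElem]
  constructor
  · intro h i hi
    have hm : (i : Int) ∈ PySem.List.pyRange 0 ((row.length : Int) - 1) :=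
      PySem.List.mem_pyRange_one.2 ⟨by positivity, by push_cast; omega⟩
    have hh := h _ hm
    rw [show (i : Int) + 1 = ((i + 1 : Nat) : Int) by norm_cast] at hh
    rw [pyGetD_coe row (by omega), pyGetD_coe row hi] at hh
    simpa [pvQ] using hh
  · intro h x hx
    obtain ⟨hx0, hxn⟩ := PySem.List.mem_pyRange_one.1 hx
    have hxe : x = ((x.toNat : Nat) : Int) := by omega
    have hi : x.toNat + 1 < row.length := by omega
    have hh := h x.toNat hi
    rw [hxe, show ((x.toNat : Nat) : Int) + 1 = ((x.toNat + 1 : Nat) : Int) by norm_cast,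
      pyGetD_coe row (by omega : x.toNat < row.length), pyGetD_coe row hi]
    simpa [pvQ] using hh

theorem sorted_id_eq_iff (row : List Int) :
    PySem.List.sorted row (fun x => x) = row ↔ row.Pairwise (· ≤ ·) := by
  constructor
  · intro h; conv_rhs => rw [← h]
    exact PySem.List.sorted_pairwise row (fun x => x)
  · exact PySem.List.sorted_eq_self_of_pairwise row (fun x => x)

theorem sorted_rev_eq_iff (row : List Int) :
    PySem.List.sorted row (fun x => x) true = row ↔ row.Pairwise (fun a b => b ≤ a) := by
  constructor
  · intro h; conv_rhs => rw [← h]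
    exact PySem.List.sorted_pairwise_rev row (fun x => x)
  · exact PySem.List.sorted_rev_eq_self_of_pairwise row (fun x => x)

theorem chainGood_mono {row : List Int} (h : List.IsChain pvGood row) : row.Pairwise (· ≤ ·) :=
  List.isChain_iff_pairwise.1 (h.imp fun a b hg => by have := hg.1; omega)

theorem chainGoodNeg_anti {row : List Int} (h : List.IsChain pvGood (row.map (fun x => -x))) :
    row.Pairwise (fun a b => b ≤ a) := by
  have h2 := (List.isChain_map (fun x : Int => -x)).1 h
  have h3 : List.IsChain (fun a b : Int => b ≤ a) row :=
    h2.imp fun a b hg => by have := hg.1; omega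
  exact List.isChain_iff_pairwise.1 h3

theorem is_safe_iff (row : List Int) :
    pv_is_safe row = true ↔ List.IsChain pvGood row ∨ List.IsChain pvGood (row.map (fun x => -x)) := by
  unfold pv_is_safe
  split_ifs with hcond
  · simp only [false_iff]
    rintro (h | h)
    · exact hcond.1 ((sorted_id_eq_iff row).2 (chainGood_mono h))
    · exact hcond.2 ((sorted_rev_eq_iff row).2 (chainGoodNeg_anti h))
  · have hmono : row.Pairwise (· ≤ ·) ∨ row.Pairwise (fun a b => b ≤ a) := by
      rcases not_and_or.1 hcond with h | h
      · exact Or.inl ((sorted_id_eq_iff row).1 (not_not.1 h))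
      · exact Or.inr ((sorted_rev_eq_iff row).1 (not_not.1 h))
    rw [loop_iff]
    constructor
    · intro hq
      rcases hmono with hp | hp
      · refine Or.inl (List.isChain_iff_getElem.2 fun i hi => ?_)
        have h1 := List.isChain_iff_getElem.1 hq i hi
        have h2 := List.pairwise_iff_getElem.1 hp i (i + 1) (by omega) hi (by omega)
        unfold pvQ at h1; unfold pvGood
        rcases abs_cases (row[i] - row[i + 1]) with ⟨he, _⟩ | ⟨he, _⟩ <;> omega
      · refine Or.inr ((List.isChain_map (fun x : Int => -x)).2 (List.isChain_iff_getElem.2 fun i hi => ?_))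
        have h1 := List.isChain_iff_getElem.1 hq i hi
        have h2 := List.pairwise_iff_getElem.1 hp i (i + 1) (by omega) hi (by omega)
        unfold pvQ at h1; unfold pvGood
        rcases abs_cases (row[i] - row[i + 1]) with ⟨he, _⟩ | ⟨he, _⟩ <;> constructor <;> omega
    · intro h
      refine List.isChain_iff_getElem.2 fun i hi => ?_
      unfold pvQ
      rcases h with h | h
      · have h1 := List.isChain_iff_getElem.1 h i hi
        unfold pvGood at h1
        rcases abs_cases (row[i] - row[i + 1]) with ⟨he, _⟩ | ⟨he, _⟩ <;> omega
      · have h1 := List.isChain_iff_getElem.1 ((List.isChain_map (fun x : Int => -x)).1 h) i hi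
        unfold pvGood at h1
        rcases abs_cases (row[i] - row[i + 1]) with ⟨he, _⟩ | ⟨he, _⟩ <;> omega

theorem a_side_iff (row : List Int) :
    is_dampener_safe row = true ↔
      pv_is_safe row = true ∨ ∃ k < row.length, pv_is_safe (row.eraseIdx k) = true := by
  by_cases hs : pv_is_safe row = true
  · simp [is_dampener_safe, hs]
  · simp only [is_dampener_safe, hs, if_false, Bool.false_eq_true, false_or]
    rw [List.any_eq_true]
    constructor
    · rintro ⟨x, hx, hp⟩
      obtain ⟨hx0, hxn⟩ := PySem.List.mem_pyRange_one.1 hx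
      have hxe : x = ((x.toNat : Nat) : Int) := by omega
      have hlt : x.toNat < row.length := by omega
      rw [hxe, PySem.List.pop?_natCast row x.toNat hlt] at hp
      exact ⟨x.toNat, hlt, hp⟩
    · rintro ⟨k, hk, hp⟩
      refine ⟨(k : Int), PySem.List.mem_pyRange_one.2 ⟨by positivity, by exact_mod_cast hk⟩, ?_⟩
      rw [PySem.List.pop?_natCast row k hk]
      exact hp

-- ===== VERDICT (by name: the statement is the Claim_ definition above) =====
theorem is_dampener_safe_spec : Claim_equal_is_dampener_safe := by
  intro row _
  unfold Spec_is_dampener_safe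
  rw [Bool.eq_iff_iff, a_side_iff]
  unfold is_dampener_safe_alt
  rw [Bool.or_eq_true, dampAsc_iff, dampAsc_iff]
  simp only [is_safe_iff, List.length_map, List.eraseIdx_map]
  constructor
  · rintro (⟨h | h⟩ | ⟨k, hk, h | h⟩)
    · exact Or.inl (Or.inl h)
    · exact Or.inr (Or.inl h)
    · exact Or.inl (Or.inr ⟨k, hk, h⟩)
    · exact Or.inr (Or.inr ⟨k, hk, h⟩)
  · rintro (⟨h | ⟨k, hk, h⟩⟩ | ⟨h | ⟨k, hk, h⟩⟩)
    · exact Or.inl (Or.inl h)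
    · exact Or.inr ⟨k, hk, Or.inl h⟩
    · exact Or.inl (Or.inr h)
    · exact Or.inr ⟨k, hk, Or.inr h⟩
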